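-- pv_equiv track=rewrite | github.com/haoyudu/bron-kerbosch-for-orbit-clique | LinesOnFermatIntroCode.py | LargestSkewSet
-- ===== SOURCE A (Python) =====
-- def LargestSkewSet(X):
--     indexes = [];
--     size = len(X[0]);
--     for i in range(len(X)):
--         if len(X[i]) > size:
--             size = len(X[i]);
--     for i in range(len(X)):
--         if len(X[i]) == size:
--             indexes.append(i)
--     return size, indexes
-- ===== SOURCE B (Python) =====
-- def LargestSkewSet(X):
--     size = len(X[0])
--     indexes = []
--     for i in range(len(X)):
--         l = len(X[i])
--         if l > size:
--             size = l
--             indexes = [i]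
--         elif l == size:
--             indexes.append(i)
--     return size, indexes
-- ===== Notes on version B (the rewrite author's own statement) =====
-- stated objective: alternative
-- what changed: B replaces A's two full passes (one to find the maximum length, one to collect matching indices) by a single pass that resets the index list whenever a new maximum appears.
import Mathlib
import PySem

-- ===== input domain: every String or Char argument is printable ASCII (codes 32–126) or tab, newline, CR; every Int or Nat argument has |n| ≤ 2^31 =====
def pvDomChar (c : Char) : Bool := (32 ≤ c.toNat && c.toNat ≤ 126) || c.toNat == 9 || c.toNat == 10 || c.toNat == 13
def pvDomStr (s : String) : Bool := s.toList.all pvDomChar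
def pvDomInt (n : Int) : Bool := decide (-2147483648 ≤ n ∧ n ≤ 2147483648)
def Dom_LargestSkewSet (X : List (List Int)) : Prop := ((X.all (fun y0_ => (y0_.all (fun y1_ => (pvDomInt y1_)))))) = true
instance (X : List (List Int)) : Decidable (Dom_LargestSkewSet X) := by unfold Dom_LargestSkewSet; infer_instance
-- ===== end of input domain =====

-- B does the same job in ONE pass (resetting the index list on a new maximum) instead of A's two passes; return values proved equal on nonempty X.

-- ===== PORT A =====
-- A: size = len(X[0]); first loop raises size to the max length; second loop collects indices of that length.
def LargestSkewSet (X : List (List Int)) : Int × List Int :=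
  let size0 : Int := ((X.headD []).length : Int)
  let size : Int := (PySem.List.pyRange 0 X.length 1).foldl
    (fun s i => if ((PySem.List.pyGetD X i []).length : Int) > s
                then ((PySem.List.pyGetD X i []).length : Int) else s) size0
  let indexes : List Int := (PySem.List.pyRange 0 X.length 1).foldl
    (fun acc i => if ((PySem.List.pyGetD X i []).length : Int) = size then acc ++ [i] else acc) []
  (size, indexes)

-- ===== PORT B =====
-- B: single pass carrying (size, indexes); a strictly larger length resets indexes to [i], an equal one appends i.
def LargestSkewSet_alt (X : List (List Int)) : Int × List Int :=
  (PySem.List.pyRange 0 X.length 1).foldl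
    (fun (p : Int × List Int) i =>
      let l : Int := ((PySem.List.pyGetD X i []).length : Int)
      if l > p.1 then (l, [i])
      else if l = p.1 then (p.1, p.2 ++ [i])
      else p)
    (((X.headD []).length : Int), [])

-- ===== PRECONDITION & SPEC =====
-- Python A raises IndexError on X = [] (at len(X[0])); exactly that input is excluded.
def Pre_LargestSkewSet (X : List (List Int)) : Prop := X ≠ []
instance (X : List (List Int)) : Decidable (Pre_LargestSkewSet X) := by unfold Pre_LargestSkewSet; infer_instance
def pvWitness_LargestSkewSet : List (List Int) := [[1], [2, 3], [4]]

def Spec_LargestSkewSet (X : List (List Int)) (out : Int × List Int) : Prop := out = LargestSkewSet_alt X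
instance (X : List (List Int)) (out : Int × List Int) : Decidable (Spec_LargestSkewSet X out) := by unfold Spec_LargestSkewSet; infer_instance

-- ===== CLAIM (what is proved, stated in full; the proofs are below) =====
def Claim_equal_LargestSkewSet : Prop := ∀ (X : List (List Int)), Dom_LargestSkewSet X → Pre_LargestSkewSet X → Spec_LargestSkewSet X (LargestSkewSet X)

-- ===== LEMMAS AND PROOFS =====

-- the max-accumulating fold (A's first loop), over an arbitrary length function f
def pvMaxF (f : Int → Int) (is : List Int) (s : Int) : Int :=
  is.foldl (fun s i => if f i > s then f i else s) s

-- B's loop body, named so the induction can rewrite one step at a time (defeq to the lambda in LargestSkewSet_alt)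
def pvBStep (f : Int → Int) (p : Int × List Int) (i : Int) : Int × List Int :=
  if f i > p.1 then (f i, [i]) else if f i = p.1 then (p.1, p.2 ++ [i]) else p

theorem pvMaxF_ge (f : Int → Int) (is : List Int) (s : Int) : s ≤ pvMaxF f is s := by
  induction is generalizing s with
  | nil => simp [pvMaxF]
  | cons i is ih =>
    simp only [pvMaxF, List.foldl_cons]
    split_ifs with h
    · exact le_trans (by omega) (ih (f i))
    · exact ih s

-- A's second loop is a filter
theorem pvFilterLoop (f : Int → Int) (m : Int) (is : List Int) (acc : List Int) :
    is.foldl (fun acc i => if f i = m then acc ++ [i] else acc) acc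
    = acc ++ is.filter (fun i => decide (f i = m)) := by
  induction is generalizing acc with
  | nil => simp
  | cons i is ih =>
    simp only [List.foldl_cons, List.filter_cons]
    by_cases h : f i = m
    · simp [h, ih]
    · simp [h, ih]

-- characterisation of B's single pass: the accumulator survives iff no element exceeded the start value
theorem pvBLoop (f : Int → Int) (is : List Int) (s : Int) (acc : List Int) :
    is.foldl (pvBStep f) (s, acc)
    = (pvMaxF f is s,
       (if pvMaxF f is s = s then acc else []) ++ is.filter (fun i => decide (f i = pvMaxF f is s))) := by
  induction is generalizing s acc with
  | nil => simp [pvMaxF]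
  | cons i is ih =>
    have hM : pvMaxF f (i :: is) s = pvMaxF f is (if f i > s then f i else s) := by
      simp [pvMaxF]
    rw [List.foldl_cons]
    by_cases h1 : f i > s
    · rw [show pvBStep f (s, acc) i = (f i, [i]) by simp [pvBStep, h1]]
      rw [ih (f i) [i], hM, if_pos h1]
      have hge := pvMaxF_ge f is (f i)
      rw [if_neg (by omega : ¬ pvMaxF f is (f i) = s)]
      simp only [List.filter_cons]
      by_cases h2 : f i = pvMaxF f is (f i)
      · rw [if_pos h2.symm,
          show (decide (f i = pvMaxF f is (f i))) = true from by rw [decide_eq_true_eq]; exact h2]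
        simp
      · rw [if_neg (fun h => h2 h.symm),
          show (decide (f i = pvMaxF f is (f i))) = false from by rw [decide_eq_false_iff_not]; exact h2]
        simp
    · by_cases h2 : f i = s
      · rw [show pvBStep f (s, acc) i = (s, acc ++ [i]) by simp [pvBStep, h2]]
        rw [ih s (acc ++ [i]), hM, if_neg h1]
        simp only [List.filter_cons]
        by_cases h3 : pvMaxF f is s = s
        · simp [h3, h2]
        · have hge := pvMaxF_ge f is s
          have hd : (decide (f i = pvMaxF f is s)) = false := by
            simp only [decide_eq_false_iff_not]; omega
          simp [h3, hd]
      · rw [show pvBStep f (s, acc) i = (s, acc) by simp [pvBStep, h1, h2]]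
        rw [ih s acc, hM, if_neg h1]
        have hge := pvMaxF_ge f is s
        have hd : (decide (f i = pvMaxF f is s)) = false := by
          simp only [decide_eq_false_iff_not]; omega
        simp [hd]

-- combine: A's (max, filter) pair equals B's one-pass fold
theorem pvMain (f : Int → Int) (is : List Int) (s0 : Int) :
    (pvMaxF f is s0,
     is.foldl (fun acc i => if f i = pvMaxF f is s0 then acc ++ [i] else acc) [])
    = is.foldl (pvBStep f) (s0, []) := by
  rw [pvBLoop, pvFilterLoop f (pvMaxF f is s0) is []]
  simp

-- ===== VERDICT (by name: the statement is the Claim_ definition above) =====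
theorem LargestSkewSet_spec : Claim_equal_LargestSkewSet := by
  intro X _ _
  exact pvMain (fun i => ((PySem.List.pyGetD X i []).length : Int))
    (PySem.List.pyRange 0 (X.length : Int) 1) ((X.headD []).length : Int)
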